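-- pv_equiv track=rewrite | github.com/wellemut/analysis | helpers/get_context.py | get_context
-- ===== SOURCE A (Python) =====
-- def get_context(string, start, end, context):
--     # Identify the desired start and end positions
--     desired_start_pos = max(start - context, 0)
--     desired_end_pos = min(end + context, len(string))
--
--     # Identify the next word break around the desired start and end positions
--     start_pos = 0
--     end_pos = len(string)
--     for word_break in [" ", "\n"]:
--         # Identify the word break before the desired_start_pos
--         start_break_pos = string.rfind(word_break, 0, desired_start_pos)
--         if start_break_pos > start_pos and start_break_pos != -1:
--             start_pos = start_break_pos
--
--         # Identify the word breakd after the desired_end_pos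
--         end_break_pos = string.find(word_break, desired_end_pos)
--         if end_break_pos < end_pos and end_break_pos != -1:
--             end_pos = end_break_pos
--
--     return string[start_pos:end_pos].strip()
-- ===== SOURCE B (Python) =====
-- def get_context(string, start, end, context):
--     # One backward character scan over the head and one forward scan over the
--     # tail, using slices for Python's bound clamping; no library find/rfind.
--     n = len(string)
--     head = string[:max(start - context, 0)]
--     tail = string[min(end + context, n):]
--
--     start_pos = 0
--     i = len(head) - 1
--     while i >= 0:
--         if head[i] in " \n":
--             start_pos = i
--             break
--         i -= 1
--
--     end_pos = n
--     base = n - len(tail)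
--     for j, ch in enumerate(tail):
--         if ch in " \n":
--             end_pos = base + j
--             break
--
--     return string[start_pos:end_pos].strip()
-- ===== Notes on version B (the rewrite author's own statement) =====
-- stated objective: alternative
-- what changed: Replaces the loop over the two word-break characters with its two rfind/find library searches per direction by one backward manual character scan over the head slice and one forward manual scan over the tail slice, testing membership in {' ', ' '} directly.
import Mathlib
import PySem

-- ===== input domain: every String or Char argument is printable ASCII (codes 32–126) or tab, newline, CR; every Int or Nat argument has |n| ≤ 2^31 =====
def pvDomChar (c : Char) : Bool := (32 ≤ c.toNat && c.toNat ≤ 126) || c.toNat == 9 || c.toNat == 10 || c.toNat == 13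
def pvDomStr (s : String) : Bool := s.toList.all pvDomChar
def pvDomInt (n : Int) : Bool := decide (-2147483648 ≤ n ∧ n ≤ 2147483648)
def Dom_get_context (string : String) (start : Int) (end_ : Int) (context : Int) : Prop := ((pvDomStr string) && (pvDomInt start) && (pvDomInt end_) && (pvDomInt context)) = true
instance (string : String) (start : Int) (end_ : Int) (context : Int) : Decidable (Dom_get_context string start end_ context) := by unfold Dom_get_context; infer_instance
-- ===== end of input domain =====

-- B replaces the per-direction library rfind/find calls over two separate word-break
-- characters with one backward and one forward manual character scan over head/tail
-- slices (objective: alternative decomposition, same cost).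


-- ===== PORT A =====
def get_context (string : String) (start : Int) (end_ : Int) (context : Int) : String :=
  let desired_start_pos : Int := max (start - context) 0
  let desired_end_pos : Int := min (end_ + context) (PySem.Str.len string)
  let r := [" ", "\n"].foldl (fun (sp : Int × Int) wb =>
      let start_break_pos := PySem.Str.rfindFrom string wb 0 (some desired_start_pos)
      let sp1 := if start_break_pos > sp.1 ∧ start_break_pos ≠ -1 then start_break_pos else sp.1
      let end_break_pos := PySem.Str.findFrom string wb desired_end_pos none
      let ep1 := if end_break_pos < sp.2 ∧ end_break_pos ≠ -1 then end_break_pos else sp.2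
      (sp1, ep1)) (0, PySem.Str.len string)
  PySem.Str.strip (PySem.Str.slice string (some r.1) (some r.2))

-- ===== PORT B =====
-- backward while loop of Source B: index i runs fuel-1, …, 0; stops at the first break char
def scanBackAux (head : List Char) : Nat → Int
  | 0 => 0
  | (i+1) => if head.getD i 'a' = ' ' ∨ head.getD i 'a' = '\n' then (i : Int) else scanBackAux head i

-- forward for-loop of Source B: offset of the first break char, if any
def firstBreakIdx : List Char → Option Nat
  | [] => none
  | c :: rest =>
    if c = ' ' ∨ c = '\n' then some 0 else
      match firstBreakIdx rest with
      | some j => some (j + 1)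
      | none => none

def get_context_alt (string : String) (start : Int) (end_ : Int) (context : Int) : String :=
  let n : Int := PySem.Str.len string
  let head := PySem.Str.slice string none (some (max (start - context) 0))
  let tail := PySem.Str.slice string (some (min (end_ + context) n)) none
  let start_pos : Int := scanBackAux head.toList head.toList.length
  let base : Int := n - PySem.Str.len tail
  let end_pos : Int :=
    match firstBreakIdx tail.toList with
    | some j => base + j
    | none => n
  PySem.Str.strip (PySem.Str.slice string (some start_pos) (some end_pos))

-- ===== PRECONDITION & SPEC =====
def Spec_get_context (string : String) (start : Int) (end_ : Int) (context : Int) (out : String) : Prop := out = get_context_alt string start end_ context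
instance (string : String) (start : Int) (end_ : Int) (context : Int) (out : String) : Decidable (Spec_get_context string start end_ context out) := by unfold Spec_get_context; infer_instance

-- ===== CLAIM (what is proved, stated in full; the proofs are below) =====
def Claim_equal_get_context : Prop := ∀ (string : String) (start : Int) (end_ : Int) (context : Int), Dom_get_context string start end_ context → Spec_get_context string start end_ context (get_context string start end_ context)

-- ===== LEMMAS AND PROOFS =====

theorem prefix_single_append (l : List Char) (a w : Char) (hl : l ≠ []) :
    [w].isPrefixOf (l ++ [a]) = [w].isPrefixOf l := by
  cases l with
  | nil => exact absurd rfl hl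
  | cons c t => simp [List.isPrefixOf]

theorem rfind_go_append (h : List Char) (a w : Char) :
    ∀ x, x < h.length → PySem.Chars.rfind.go (h ++ [a]) [w] x = PySem.Chars.rfind.go h [w] x := by
  intro x
  induction x with
  | zero =>
    intro hx
    simp only [PySem.Chars.rfind.go]
    rw [show [w].isPrefixOf (h ++ [a]) = [w].isPrefixOf h from
      prefix_single_append h a w (by intro e; simp [e] at hx)]
  | succ j ih =>
    intro hx
    simp only [PySem.Chars.rfind.go]
    rw [List.drop_append_of_le_length (by omega)]
    rw [prefix_single_append _ a w (by simp; omega)]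
    rw [ih (by omega)]

theorem rfind_nil (w : Char) : PySem.Chars.rfind [] [w] = -1 := by
  simp [PySem.Chars.rfind, PySem.Chars.rfind.go, List.isPrefixOf]

theorem rfind_snoc (h : List Char) (a w : Char) :
    PySem.Chars.rfind (h ++ [a]) [w] = if a = w then (h.length : Int) else PySem.Chars.rfind h [w] := by
  have hlen : (h ++ [a]).length = h.length + 1 := by simp
  rw [PySem.Chars.rfind, hlen]
  rw [show PySem.Chars.rfind.go (h ++ [a]) [w] (h.length + 1)
      = PySem.Chars.rfind.go (h ++ [a]) [w] h.length by
    simp only [PySem.Chars.rfind.go]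
    rw [show h.length + 1 = (h ++ [a]).length by simp, List.drop_length]
    simp [List.isPrefixOf]]
  cases hh : h.length with
  | zero =>
    have : h = [] := List.eq_nil_of_length_eq_zero hh
    subst this
    simp only [PySem.Chars.rfind.go, rfind_nil, List.nil_append]
    simp [List.isPrefixOf, @eq_comm Char w a]
  | succ m =>
    simp only [PySem.Chars.rfind.go]
    rw [← hh, List.drop_append_of_le_length le_rfl, List.drop_length, List.nil_append]
    rw [rfind_go_append h a w m (by omega)]
    have hr : PySem.Chars.rfind h [w] = PySem.Chars.rfind.go h [w] m := by
      rw [PySem.Chars.rfind, hh]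
      simp only [PySem.Chars.rfind.go]
      rw [← hh, List.drop_length]
      simp [List.isPrefixOf]
    rw [hr]
    simp [List.isPrefixOf, @eq_comm Char w a]

theorem neg_one_le_rfind (h : List Char) (w : Char) : -1 ≤ PySem.Chars.rfind h [w] := by
  induction h using List.reverseRecOn with
  | nil => simp [rfind_nil]
  | append_singleton h a ih =>
    rw [rfind_snoc]
    split_ifs <;> omega

theorem rfind_lt_length (h : List Char) (w : Char) : PySem.Chars.rfind h [w] < h.length := by
  induction h using List.reverseRecOn with
  | nil => simp [rfind_nil]
  | append_singleton h a ih =>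
    rw [rfind_snoc]
    simp only [List.length_append, List.length_cons, List.length_nil]
    split_ifs <;> push_cast <;> omega

theorem scanBackAux_append (h : List Char) (a : Char) :
    ∀ x, x ≤ h.length → scanBackAux (h ++ [a]) x = scanBackAux h x := by
  intro x
  induction x with
  | zero => intro; rfl
  | succ j ih =>
    intro hx
    have hg : (h ++ [a]).getD j 'a' = h.getD j 'a' := by
      simp [List.getD, List.getElem?_append_left (show j < h.length by omega)]
    simp only [scanBackAux, hg]
    rw [ih (by omega)]

theorem start_side (h : List Char) :
    (if PySem.Chars.rfind h ['\n'] > (if PySem.Chars.rfind h [' '] > 0 ∧ PySem.Chars.rfind h [' '] ≠ -1 then PySem.Chars.rfind h [' '] else 0) ∧ PySem.Chars.rfind h ['\n'] ≠ -1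
      then PySem.Chars.rfind h ['\n']
      else (if PySem.Chars.rfind h [' '] > 0 ∧ PySem.Chars.rfind h [' '] ≠ -1 then PySem.Chars.rfind h [' '] else 0))
    = scanBackAux h h.length := by
  induction h using List.reverseRecOn with
  | nil => simp [rfind_nil, scanBackAux]
  | append_singleton h a ih =>
    have b1 := rfind_lt_length h ' '
    have b2 := rfind_lt_length h '\n'
    have n1 := neg_one_le_rfind h ' '
    have n2 := neg_one_le_rfind h '\n'
    have hlen : (h ++ [a]).length = h.length + 1 := by simp
    have hg : (h ++ [a]).getD h.length 'a' = a := by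
      simp [List.getD, List.getElem?_append_right (le_refl h.length)]
    rw [hlen]
    simp only [scanBackAux, hg]
    rw [scanBackAux_append h a h.length le_rfl]
    rw [rfind_snoc, rfind_snoc]
    by_cases h1 : a = ' '
    · subst h1
      simp only [Char.reduceEq, reduceIte, true_or, if_true]
      split_ifs <;> push_cast <;> omega
    · by_cases h2 : a = '\n'
      · subst h2
        simp only [Char.reduceEq, reduceIte, or_true, if_true]
        split_ifs <;> push_cast <;> omega
      · rw [if_neg h1, if_neg h2, if_neg (show ¬(a = ' ' ∨ a = '\n') by simp [h1, h2])]
        exact ih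

theorem find_nil (w : Char) : PySem.Chars.find [] [w] = -1 := by
  simp [PySem.Chars.find, PySem.Chars.find.go, List.isEmpty]

theorem find_go_shift (w : Char) (t : List Char) :
    ∀ k, PySem.Chars.find.go [w] t k =
      if PySem.Chars.find t [w] = -1 then -1 else (k : Int) + PySem.Chars.find t [w] := by
  induction t with
  | nil => intro k; simp [PySem.Chars.find, PySem.Chars.find.go, List.isEmpty]
  | cons c t ih =>
    intro k
    have hfind : PySem.Chars.find (c :: t) [w] = PySem.Chars.find.go [w] (c :: t) 0 := rfl
    have hnn := PySem.Chars.neg_one_le_find t [w]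
    by_cases hp : [w].isPrefixOf (c :: t) = true
    · simp only [PySem.Chars.find.go, hp, if_true, hfind]
      omega
    · simp only [PySem.Chars.find.go, hp, if_false, Bool.false_eq_true, hfind]
      rw [ih (k + 1), ih 1]
      have : PySem.Chars.find t [w] = PySem.Chars.find.go [w] t 0 := rfl
      split_ifs <;> push_cast <;> omega

theorem find_cons (c : Char) (t : List Char) (w : Char) :
    PySem.Chars.find (c :: t) [w] =
      if c = w then 0 else (if PySem.Chars.find t [w] = -1 then -1 else 1 + PySem.Chars.find t [w]) := by
  have : PySem.Chars.find (c :: t) [w] = PySem.Chars.find.go [w] (c :: t) 0 := rfl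
  rw [this]
  simp only [PySem.Chars.find.go]
  rw [find_go_shift]
  have hp : [w].isPrefixOf (c :: t) = decide (c = w) := by
    cases t <;> by_cases hc : c = w <;> simp [List.isPrefixOf, hc] <;> exact fun e => hc e.symm
  rw [hp]
  by_cases hc : c = w <;> simp [hc]

theorem find_lt_length (t : List Char) (w : Char) : PySem.Chars.find t [w] < t.length := by
  induction t with
  | nil => simp [find_nil]
  | cons c t ih =>
    rw [find_cons]
    have := PySem.Chars.neg_one_le_find t [w]
    simp only [List.length_cons]
    split_ifs <;> push_cast <;> omega

theorem neg_one_le_find' (t : List Char) (w : Char) : -1 ≤ PySem.Chars.find t [w] :=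
  PySem.Chars.neg_one_le_find t [w]

set_option maxHeartbeats 1000000 in
theorem end_side (t : List Char) :
    (if PySem.Chars.find t ['\n'] < (if PySem.Chars.find t [' '] < (t.length : Int) ∧ PySem.Chars.find t [' '] ≠ -1 then PySem.Chars.find t [' '] else (t.length : Int)) ∧ PySem.Chars.find t ['\n'] ≠ -1
      then PySem.Chars.find t ['\n']
      else (if PySem.Chars.find t [' '] < (t.length : Int) ∧ PySem.Chars.find t [' '] ≠ -1 then PySem.Chars.find t [' '] else (t.length : Int)))
    = (firstBreakIdx t).elim (t.length : Int) (fun j => (j : Int)) := by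
  induction t with
  | nil => simp [find_nil, firstBreakIdx]
  | cons c u ih =>
    have b1 := find_lt_length u ' '
    have b2 := find_lt_length u '\n'
    have n1 := neg_one_le_find' u ' '
    have n2 := neg_one_le_find' u '\n'
    rw [find_cons, find_cons]
    by_cases h1 : c = ' '
    · subst h1
      simp only [Char.reduceEq, reduceIte, firstBreakIdx, true_or, if_true, List.length_cons,
        Option.elim_some, Nat.cast_zero]
      split_ifs <;> push_cast <;> omega
    · by_cases h2 : c = '\n'
      · subst h2
        simp only [Char.reduceEq, reduceIte, firstBreakIdx, or_true, if_true, List.length_cons,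
          Option.elim_some, Nat.cast_zero]
        split_ifs <;> push_cast <;> omega
      · rw [if_neg h1, if_neg h2]
        simp only [firstBreakIdx, if_neg (show ¬(c = ' ' ∨ c = '\n') by simp [h1, h2]), List.length_cons]
        cases hfb : firstBreakIdx u with
        | none =>
          simp only [hfb, Option.elim_none, Option.elim_some] at ih ⊢
          split_ifs at ih ⊢ <;> omega
        | some j =>
          simp only [hfb, Option.elim_none, Option.elim_some] at ih ⊢
          split_ifs at ih ⊢ <;> omega

theorem clampIdx_le (n : Nat) (i : Int) : PySem.List.clampIdx n i ≤ n := by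
  unfold PySem.List.clampIdx; split_ifs <;> omega

theorem rfindFrom_zero_some (cs : List Char) (w : Char) (d : Int) (hd : 0 ≤ d) :
    PySem.Chars.rfindFrom cs [w] 0 (some d) =
      PySem.Chars.rfind (cs.take (PySem.List.clampIdx cs.length d)) [w] := by
  have hcl : (if (cs.length : Int) < d then (cs.length : Int) else if d < 0 then (if d + cs.length < 0 then 0 else d + cs.length) else d).toNat = PySem.List.clampIdx cs.length d := by
    unfold PySem.List.clampIdx; split_ifs <;> omega
  have hr := neg_one_le_rfind (cs.take (PySem.List.clampIdx cs.length d)) w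
  simp only [PySem.Chars.rfindFrom]
  rw [if_neg (by split_ifs <;> omega)]
  rw [show (if (0:Int) < 0 then if 0 + (cs.length:Int) < 0 then (0:Int) else 0 + cs.length else 0).toNat = 0 by norm_num]
  rw [List.drop_zero, hcl]
  split_ifs <;> omega

theorem findFrom_none (cs : List Char) (w : Char) (d : Int) (hd : d ≤ cs.length) :
    PySem.Chars.findFrom cs [w] d none =
      (if PySem.Chars.find ((cs.drop (PySem.List.clampIdx cs.length d))) [w] = -1 then -1
       else (PySem.List.clampIdx cs.length d : Int) + PySem.Chars.find ((cs.drop (PySem.List.clampIdx cs.length d))) [w]) := by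
  have hst : (if d < 0 then (if d + cs.length < 0 then 0 else d + cs.length) else d).toNat = PySem.List.clampIdx cs.length d := by
    unfold PySem.List.clampIdx; split_ifs <;> omega
  have hstv : (if d < 0 then (if d + cs.length < 0 then 0 else d + cs.length) else d) = (PySem.List.clampIdx cs.length d : Int) := by
    unfold PySem.List.clampIdx; split_ifs <;> omega
  simp only [PySem.Chars.findFrom]
  rw [if_neg (by split_ifs <;> omega)]
  rw [Int.toNat_natCast, List.take_length, hst, hstv]

theorem slice_prefix (cs : List Char) (d : Int) :
    PySem.List.slice cs none (some d) = cs.take (PySem.List.clampIdx cs.length d) := by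
  simp [PySem.List.slice]

theorem slice_suffix (cs : List Char) (d : Int) :
    PySem.List.slice cs (some d) none = cs.drop (PySem.List.clampIdx cs.length d) := by
  simp only [PySem.List.slice]
  exact List.take_of_length_le (by simp)

theorem end_lift (u : List Char) (k : Nat) (n : Int) (hn : n = k + u.length) :
    (if (if PySem.Chars.find u ['\n'] = -1 then (-1 : Int) else k + PySem.Chars.find u ['\n']) < (if (if PySem.Chars.find u [' '] = -1 then (-1 : Int) else k + PySem.Chars.find u [' ']) < n ∧ (if PySem.Chars.find u [' '] = -1 then (-1 : Int) else k + PySem.Chars.find u [' ']) ≠ -1 then (if PySem.Chars.find u [' '] = -1 then (-1 : Int) else k + PySem.Chars.find u [' ']) else n) ∧ (if PySem.Chars.find u ['\n'] = -1 then (-1 : Int) else k + PySem.Chars.find u ['\n']) ≠ -1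
      then (if PySem.Chars.find u ['\n'] = -1 then (-1 : Int) else k + PySem.Chars.find u ['\n'])
      else (if (if PySem.Chars.find u [' '] = -1 then (-1 : Int) else k + PySem.Chars.find u [' ']) < n ∧ (if PySem.Chars.find u [' '] = -1 then (-1 : Int) else k + PySem.Chars.find u [' ']) ≠ -1 then (if PySem.Chars.find u [' '] = -1 then (-1 : Int) else k + PySem.Chars.find u [' ']) else n))
    = (firstBreakIdx u).elim n (fun j => (k + j : Int)) := by
  subst hn
  have base := end_side u
  have b1 := find_lt_length u ' '
  have b2 := find_lt_length u '\n'
  have n1 := neg_one_le_find' u ' '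
  have n2 := neg_one_le_find' u '\n'
  cases hfb : firstBreakIdx u with
  | none =>
    simp only [hfb, Option.elim_none] at base ⊢
    split_ifs at base ⊢ <;> omega
  | some j =>
    simp only [hfb, Option.elim_some] at base ⊢
    split_ifs at base ⊢ <;> omega


-- ===== VERDICT (by name: the statement is the Claim_ definition above) =====
theorem get_context_spec : Claim_equal_get_context := by
  intro string start end_ context _
  unfold Spec_get_context get_context get_context_alt
  simp only [List.foldl_cons, List.foldl_nil, PySem.Str.rfindFrom_eq, PySem.Str.findFrom_eq,
    PySem.Str.len, PySem.Str.toList_slice, PySem.Chars.slice_eq_listSlice,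
    show (" " : String).toList = [' '] by decide, show ("\n" : String).toList = ['\n'] by decide,
    slice_prefix, slice_suffix]
  rw [rfindFrom_zero_some string.toList ' ' (max (start - context) 0) (by omega),
      rfindFrom_zero_some string.toList '\n' (max (start - context) 0) (by omega),
      findFrom_none string.toList ' ' (min (end_ + context) ↑string.toList.length) (by omega),
      findFrom_none string.toList '\n' (min (end_ + context) ↑string.toList.length) (by omega)]
  rw [start_side]
  rw [end_lift (string.toList.drop (PySem.List.clampIdx string.toList.length (min (end_ + context) ↑string.toList.length))) (PySem.List.clampIdx string.toList.length (min (end_ + context) ↑string.toList.length)) (↑string.toList.length) (by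
    have := clampIdx_le string.toList.length (min (end_ + context) ↑string.toList.length)
    rw [List.length_drop]
    omega)]
  have harith : (↑string.toList.length - ↑(string.toList.drop (PySem.List.clampIdx string.toList.length (min (end_ + context) ↑string.toList.length))).length : Int) = ↑(PySem.List.clampIdx string.toList.length (min (end_ + context) ↑string.toList.length)) := by
    have := clampIdx_le string.toList.length (min (end_ + context) ↑string.toList.length)
    rw [List.length_drop]
    omega
  cases hfb : firstBreakIdx (string.toList.drop (PySem.List.clampIdx string.toList.length (min (end_ + context) ↑string.toList.length))) with
  | none => simp [hfb]
  | some j => simp [hfb, harith]
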